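-- pv_equiv track=rewrite | github.com/ischeinfeld/py_nlp | parameters_class.py | sx_counts
-- ===== SOURCE A (Python) =====
-- import copy
--
-- def sx_counts(input_sentences):
-- 	""" Sum c(s,x)
--
-- 	"""
--
-- 	sentences = copy.deepcopy(input_sentences)
--
-- 	e = {} # counts
--
-- 	for i in range(len(sentences)):
-- 		for j in range(len(sentences[i][0])): # [0] is for words, not same # words and tags
-- 			x = sentences[i][0][j]
-- 			s = sentences[i][1][j]
--
-- 			if not s in e:
-- 				e[s] = {}
-- 			if not x in e[s]:
-- 				e[s][x] = 0
--
-- 			e[s][x] += 1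
--
-- 	return e
-- ===== SOURCE B (Python) =====
-- def sx_counts(input_sentences):
--     """ Sum c(s,x) — enumerate the distinct tags and distinct words per tag,
--     then count each pair's occurrences by scanning the flat pair stream. """
--     pairs = [(sent[1][j], x)
--              for sent in input_sentences
--              for j, x in enumerate(sent[0])]
--     return {s: {x: pairs.count((s, x))
--                 for x in dict.fromkeys(w for t, w in pairs if t == s)}
--             for s in dict.fromkeys(t for t, _ in pairs)}
-- ===== Notes on version B (the rewrite author's own statement) =====
-- stated objective: alternative
-- what changed: Instead of A's single pass that increments counts in an incrementally-built nested dict, B never increments anything: it flattens the corpus into a (tag,word) pair stream once, enumerates the distinct tags and the distinct words under each tag in first-occurrence order, and obtains each count by a fresh pairs.count scan of the stream; the deepcopy is dropped.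
import Mathlib
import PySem

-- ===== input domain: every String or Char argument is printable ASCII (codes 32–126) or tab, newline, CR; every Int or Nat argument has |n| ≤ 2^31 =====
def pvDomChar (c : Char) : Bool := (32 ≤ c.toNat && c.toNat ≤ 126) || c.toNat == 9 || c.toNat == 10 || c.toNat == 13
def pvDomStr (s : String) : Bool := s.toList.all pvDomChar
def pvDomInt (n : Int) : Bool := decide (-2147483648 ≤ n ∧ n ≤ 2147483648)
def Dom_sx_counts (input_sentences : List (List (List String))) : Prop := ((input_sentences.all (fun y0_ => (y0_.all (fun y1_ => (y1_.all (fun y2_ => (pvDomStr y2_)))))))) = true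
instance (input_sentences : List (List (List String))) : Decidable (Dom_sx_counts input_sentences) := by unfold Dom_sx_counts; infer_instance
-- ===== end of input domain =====

-- B replaces A's single incrementing pass over an incrementally-grown nested dict by a
-- count-by-scan: flatten once to a (tag,word) pair stream, enumerate distinct tags and
-- distinct words per tag, and obtain each count with a fresh pairs.count scan (no dict,
-- no increments; the deepcopy is dropped — A never observably mutates its argument).

-- ===== PORT A =====
-- loop body of A: if s not in e: e[s] = {}; if x not in e[s]: e[s][x] = 0; e[s][x] += 1
def pvStepA (e : PySem.Dict String (PySem.Dict String Int)) (x s : String) :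
    PySem.Dict String (PySem.Dict String Int) :=
  let e1 := if e.contains s then e else e.insert s PySem.Dict.empty
  let inner := e1.getD s PySem.Dict.empty
  let inner1 := if inner.contains x then inner else inner.insert x (0 : Int)
  e1.insert s (inner1.insert x (inner1.getD x 0 + 1))

def sx_counts (input_sentences : List (List (List String))) : List (String × List (String × Int)) :=
  -- sentences = copy.deepcopy(input_sentences): an equal value, read-only afterwards
  let sentences := input_sentences
  let e : PySem.Dict String (PySem.Dict String Int) :=
    (PySem.List.pyRange 0 (sentences.length : Int) 1).foldl (fun e i =>
      (PySem.List.pyRange 0 ((PySem.List.pyGetD (PySem.List.pyGetD sentences i []) 0 []).length : Int) 1).foldl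
        (fun e j => pvStepA e
          (PySem.List.pyGetD (PySem.List.pyGetD (PySem.List.pyGetD sentences i []) 0 []) j "")
          (PySem.List.pyGetD (PySem.List.pyGetD (PySem.List.pyGetD sentences i []) 1 []) j "")) e)
      PySem.Dict.empty
  e.items.map (fun p => (p.1, p.2.items))

-- ===== PORT B =====
def sx_counts_alt (input_sentences : List (List (List String))) : List (String × List (String × Int)) :=
  -- pairs = [(sent[1][j], x) for sent in input_sentences for j, x in enumerate(sent[0])]
  let pairs : List (String × String) :=
    input_sentences.flatMap (fun sent =>
      (PySem.List.enumerate (PySem.List.pyGetD sent 0 [])).map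
        (fun jw => (PySem.List.pyGetD (PySem.List.pyGetD sent 1 []) jw.1 "", jw.2)))
  -- {s: {x: pairs.count((s,x)) for x in dict.fromkeys(words of s)} for s in dict.fromkeys(tags)}
  (PySem.List.dedup (pairs.map (·.1))).map (fun s =>
    (s, (PySem.List.dedup ((pairs.filter (fun p => p.1 == s)).map (·.2))).map
        (fun x => (x, (PySem.List.count pairs (s, x) : Int)))))

-- ===== PRECONDITION & SPEC =====
-- Pre_ excludes exactly the inputs on which A raises IndexError: an empty sentence, or a sentence
-- whose word list is nonempty but that lacks a tag list or whose tag list is shorter than its words.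
def Pre_sx_counts (input_sentences : List (List (List String))) : Prop :=
  ∀ sent ∈ input_sentences, sent ≠ [] ∧
    (sent.getD 0 [] ≠ [] → 2 ≤ sent.length ∧ (sent.getD 0 []).length ≤ (sent.getD 1 []).length)
instance (input_sentences : List (List (List String))) : Decidable (Pre_sx_counts input_sentences) := by
  unfold Pre_sx_counts; infer_instance

def pvWitness_sx_counts : List (List (List String)) :=
  [[["the", "cat"], ["D", "N"]], [["the"], ["D", "X"]], [[]]]

def Spec_sx_counts (input_sentences : List (List (List String))) (out : List (String × List (String × Int))) : Prop := out = sx_counts_alt input_sentences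
instance (input_sentences : List (List (List String))) (out : List (String × List (String × Int))) : Decidable (Spec_sx_counts input_sentences out) := by unfold Spec_sx_counts; infer_instance

-- ===== CLAIM (what is proved, stated in full; the proofs are below) =====
def Claim_equal_sx_counts : Prop := ∀ (input_sentences : List (List (List String))), Dom_sx_counts input_sentences → Pre_sx_counts input_sentences → Spec_sx_counts input_sentences (sx_counts input_sentences)

-- ===== LEMMAS AND PROOFS =====

-- the flat stream of (tag, word) pairs both programs consume, in traversal order
def pvPairs (sentences : List (List (List String))) : List (String × String) :=
  sentences.flatMap (fun sent => (PySem.List.pyGetD sent 1 []).zip (PySem.List.pyGetD sent 0 []))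

def pvF (p : String × PySem.Dict String Int) : String × List (String × Int) := (p.1, p.2.items)
def pvTags (L : List (String × String)) : List String := PySem.Set.ofList (L.map (·.1))
def pvWords (L : List (String × String)) (s : String) : List String :=
  PySem.Set.ofList ((L.filter (fun p => p.1 == s)).map (·.2))
def pvG (L : List (String × String)) (s : String) : String × List (String × Int) :=
  (s, (pvWords L s).map (fun x => (x, (L.count (s, x) : Int))))
def pvGroup (L : List (String × String)) : List (String × List (String × Int)) :=
  (pvTags L).map (pvG L)
def pvFoldA (L : List (String × String)) : PySem.Dict String (PySem.Dict String Int) :=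
  L.foldl (fun e p => pvStepA e p.2 p.1) PySem.Dict.empty

-- ---- normalizing port A's index loops to a fold over pvPairs ----

theorem pv_foldl_flatMap {α β γ : Type} (l : List α) (g : α → List β) (f : γ → β → γ) (init : γ) :
    (l.flatMap g).foldl f init = l.foldl (fun acc a => (g a).foldl f acc) init := by
  induction l generalizing init with
  | nil => rfl
  | cons a t ih => simp [List.flatMap_cons, List.foldl_append, ih]

theorem pv_range_two {γ : Type} (words tags : List String) (h : words.length ≤ tags.length)
    (f : γ → String → String → γ) (init : γ) :
    (PySem.List.pyRange 0 (words.length : Int) 1).foldl (fun acc j =>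
        f acc (PySem.List.pyGetD words j "") (PySem.List.pyGetD tags j "")) init
      = (tags.zip words).foldl (fun acc p => f acc p.2 p.1) init := by
  have hlen : (tags.zip words).length = words.length := by
    simp [List.length_zip]; omega
  have hc : (PySem.List.pyRange 0 (words.length : Int) 1).foldl (fun acc j =>
        f acc (PySem.List.pyGetD words j "") (PySem.List.pyGetD tags j "")) init
      = (PySem.List.pyRange 0 ((tags.zip words).length : Int) 1).foldl (fun acc j =>
        (fun acc p => f acc p.2 p.1) acc (PySem.List.pyGetD (tags.zip words) j ("", ""))) init := by
    rw [hlen]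
    apply PySem.List.foldl_congr_mem
    intro acc j hj
    rw [PySem.List.mem_pyRange_one] at hj
    rw [PySem.List.pyGetD_eq_getElem _ _ hj.1 (by omega),
        PySem.List.pyGetD_eq_getElem _ _ hj.1 (by omega),
        PySem.List.pyGetD_eq_getElem _ _ hj.1 (by rw [hlen]; omega)]
    simp [List.getElem_zip]
  rw [hc]
  exact PySem.List.foldl_pyRange_zero_pyGetD' (tags.zip words) ("","") (fun acc p => f acc p.2 p.1) init

theorem pv_A_shape (sentences : List (List (List String))) (hpre : Pre_sx_counts sentences) :
    (PySem.List.pyRange 0 (sentences.length : Int) 1).foldl (fun e i =>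
      (PySem.List.pyRange 0 ((PySem.List.pyGetD (PySem.List.pyGetD sentences i []) 0 []).length : Int) 1).foldl
        (fun e j => pvStepA e
          (PySem.List.pyGetD (PySem.List.pyGetD (PySem.List.pyGetD sentences i []) 0 []) j "")
          (PySem.List.pyGetD (PySem.List.pyGetD (PySem.List.pyGetD sentences i []) 1 []) j "")) e)
      PySem.Dict.empty
      = pvFoldA (pvPairs sentences) := by
  have h1 := PySem.List.foldl_pyRange_zero_pyGetD' sentences ([] : List (List String))
    (fun e sent =>
      (PySem.List.pyRange 0 ((PySem.List.pyGetD sent 0 []).length : Int) 1).foldl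
        (fun e j => pvStepA e (PySem.List.pyGetD (PySem.List.pyGetD sent 0 []) j "")
          (PySem.List.pyGetD (PySem.List.pyGetD sent 1 []) j "")) e) PySem.Dict.empty
  refine h1.trans ?_
  rw [pvFoldA, pvPairs, pv_foldl_flatMap]
  apply PySem.List.foldl_congr_mem
  intro acc sent hmem
  have hg0 : PySem.List.pyGetD sent (0 : Int) [] = sent.getD 0 [] := PySem.List.pyGetD_ofNat' sent 0 []
  have hg1 : PySem.List.pyGetD sent (1 : Int) [] = sent.getD 1 [] := PySem.List.pyGetD_ofNat' sent 1 []
  have hlen : (PySem.List.pyGetD sent 0 []).length ≤ (PySem.List.pyGetD sent 1 []).length := by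
    rw [hg0, hg1]
    rcases hpre sent hmem with ⟨-, himp⟩
    by_cases hw : sent.getD 0 [] = []
    · rw [hw]; simp
    · exact (himp hw).2
  exact pv_range_two _ _ hlen (fun e x s => pvStepA e x s) acc

-- ---- normalizing port B's pair comprehension to pvPairs ----

theorem pv_enum_zip (ws ts : List String) (h : ws.length ≤ ts.length) :
    (PySem.List.enumerate ws).map (fun jw => (PySem.List.pyGetD ts jw.1 "", jw.2)) = ts.zip ws := by
  apply List.ext_getElem
  · simp [PySem.List.length_enumerate, List.length_zip]; omega
  · intro k h1 h2
    simp only [List.getElem_map, PySem.List.getElem_enumerate, List.getElem_zip]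
    have hk : k < ws.length := by simpa [PySem.List.length_enumerate] using (by simpa using h1)
    have : (0 : Int) + (k : Int) = (k : Int) := by ring
    rw [this, PySem.List.pyGetD_natCast, List.getD_eq_getElem _ _ (by omega)]

theorem pv_B_pairs (sentences : List (List (List String))) (hpre : Pre_sx_counts sentences) :
    sentences.flatMap (fun sent =>
      (PySem.List.enumerate (PySem.List.pyGetD sent 0 [])).map
        (fun jw => (PySem.List.pyGetD (PySem.List.pyGetD sent 1 []) jw.1 "", jw.2)))
      = pvPairs sentences := by
  rw [pvPairs, List.flatMap_def, List.flatMap_def]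
  congr 1
  apply List.map_congr_left
  intro sent hmem
  have hg0 : PySem.List.pyGetD sent (0 : Int) [] = sent.getD 0 [] := PySem.List.pyGetD_ofNat' sent 0 []
  have hg1 : PySem.List.pyGetD sent (1 : Int) [] = sent.getD 1 [] := PySem.List.pyGetD_ofNat' sent 1 []
  have hlen : (PySem.List.pyGetD sent 0 []).length ≤ (PySem.List.pyGetD sent 1 []).length := by
    rw [hg0, hg1]
    rcases hpre sent hmem with ⟨-, himp⟩
    by_cases hw : sent.getD 0 [] = []
    · rw [hw]; simp
    · exact (himp hw).2
  exact pv_enum_zip _ _ hlen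

-- ---- membership facts about the grouped shape ----

theorem pv_mem_tags (L : List (String × String)) (s : String) :
    s ∈ pvTags L ↔ ∃ p ∈ L, p.1 = s := by
  simp [pvTags, PySem.Set.mem_ofList]

theorem pv_mem_words (L : List (String × String)) (s x : String) :
    x ∈ pvWords L s ↔ (s, x) ∈ L := by
  simp only [pvWords, PySem.Set.mem_ofList, List.mem_map, List.mem_filter]
  constructor
  · rintro ⟨p, ⟨hp, he⟩, rfl⟩
    have : p.1 = s := by simpa using he
    rcases p with ⟨a, b⟩; simp_all
  · intro h
    exact ⟨(s, x), ⟨h, by simp⟩, rfl⟩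

theorem pv_filter_nil (L : List (String × String)) (s : String) (hs : s ∉ pvTags L) :
    L.filter (fun p => p.1 == s) = [] := by
  rw [List.filter_eq_nil_iff]
  intro p hp hb
  exact hs ((pv_mem_tags L s).mpr ⟨p, hp, by simpa using hb⟩)

theorem pv_count_zero (L : List (String × String)) (s x : String) (hs : (s, x) ∉ L) :
    L.count (s, x) = 0 := List.count_eq_zero.mpr hs

-- ---- the group side under appending one pair ----

theorem pv_count_append (L : List (String × String)) (s x t y : String) :
    (L ++ [(s, x)]).count (t, y) = L.count (t, y) + (if (t, y) = (s, x) then 1 else 0) := by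
  by_cases h : (t, y) = (s, x)
  · rw [if_pos h, List.count_append, h]; simp
  · rw [if_neg h, List.count_append]
    have h0 : List.count (t, y) [(s, x)] = 0 := List.count_eq_zero.mpr (by simp [h])
    omega

theorem pvG_append_ne (L : List (String × String)) (s x t : String) (hts : t ≠ s) :
    pvG (L ++ [(s, x)]) t = pvG L t := by
  have hw : pvWords (L ++ [(s, x)]) t = pvWords L t := by
    simp only [pvWords, List.filter_append]
    have hb : (((s, x) : String × String).1 == t) = false := by simpa using (Ne.symm hts)
    rw [List.filter_singleton, hb]
    simp
  simp only [pvG, hw]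
  congr 1
  apply List.map_congr_left
  intro y _
  have : (t, y) ≠ (s, x) := by intro h; exact hts (congrArg Prod.fst h)
  rw [pv_count_append, if_neg this]
  simp

-- ---- deriving dict lookups from the invariant ----

theorem pv_keys_of_inv (E : PySem.Dict String (PySem.Dict String Int)) (L : List (String × String))
    (hinv : E.items.map pvF = pvGroup L) : E.keys = pvTags L := by
  have h1 : (E.items.map pvF).map (·.1) = E.items.map (·.1) := by
    rw [List.map_map]; rfl
  have h2 : (pvGroup L).map (·.1) = pvTags L := by
    rw [pvGroup, List.map_map]
    have : (Prod.fst ∘ pvG L) = id := by funext t; rfl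
    rw [this, List.map_id]
  calc E.keys = E.items.map (·.1) := rfl
    _ = (E.items.map pvF).map (·.1) := h1.symm
    _ = (pvGroup L).map (·.1) := by rw [hinv]
    _ = pvTags L := h2

theorem pv_entry_of_inv (E : PySem.Dict String (PySem.Dict String Int)) (L : List (String × String))
    (hinv : E.items.map pvF = pvGroup L) (p : String × PySem.Dict String Int)
    (hp : p ∈ E.items) : p.2.items = (pvG L p.1).2 := by
  have h1 : pvF p ∈ pvGroup L := hinv ▸ List.mem_map_of_mem hp
  rw [pvGroup] at h1
  rcases List.mem_map.mp h1 with ⟨t, _, ht⟩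
  have hfst : t = p.1 := by
    have := congrArg Prod.fst ht
    simpa [pvG, pvF] using this
  have := congrArg Prod.snd ht
  rw [hfst] at this
  simpa [pvF] using this.symm

theorem pv_getD_of_inv (E : PySem.Dict String (PySem.Dict String Int)) (L : List (String × String))
    (hinv : E.items.map pvF = pvGroup L) (s : String) (hs : s ∈ pvTags L) :
    (E.getD s PySem.Dict.empty).items = (pvG L s).2 := by
  have hkeys : E.keys = pvTags L := pv_keys_of_inv E L hinv
  have hnd : E.keys.Nodup := by rw [hkeys]; exact PySem.Set.nodup_ofList _
  have hsk : s ∈ E.keys := hkeys ▸ hs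
  rcases List.mem_map.mp hsk with ⟨p, hp, hps⟩
  have hgd : E.getD p.1 PySem.Dict.empty = p.2 :=
    PySem.Dict.getD_of_mem_items E (by simpa using hp) hnd _
  rw [← hps, hgd]
  have := pv_entry_of_inv E L hinv p hp
  rw [this, hps]

theorem pv_contains_of_inv (E : PySem.Dict String (PySem.Dict String Int)) (L : List (String × String))
    (hinv : E.items.map pvF = pvGroup L) (s : String) :
    E.contains s = true ↔ s ∈ pvTags L := by
  rw [PySem.Dict.contains_iff_mem_keys, pv_keys_of_inv E L hinv]

-- inner dict: keys / contains / getD from its items shape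
theorem pv_inner_keys (d : PySem.Dict String Int) (l : List String) (f : String → Int)
    (h : d.items = l.map (fun y => (y, f y))) : d.keys = l := by
  calc d.keys = d.items.map (·.1) := rfl
    _ = (l.map (fun y => (y, f y))).map (·.1) := by rw [h]
    _ = l := by simp [Function.comp_def]

-- ---- the main invariant ----

theorem pv_invariant (L : List (String × String)) :
    (pvFoldA L).items.map pvF = pvGroup L := by
  induction L using List.reverseRecOn with
  | nil => rfl
  | append_singleton L p ih =>
    obtain ⟨s, x⟩ := p
    have hstep : pvFoldA (L ++ [(s, x)]) = pvStepA (pvFoldA L) x s := by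
      rw [pvFoldA, List.foldl_append]; rfl
    set E := pvFoldA L with hE
    have hkeys : E.keys = pvTags L := pv_keys_of_inv E L ih
    have hnd : E.keys.Nodup := by rw [hkeys]; exact PySem.Set.nodup_ofList _
    have htags' : pvTags (L ++ [(s, x)]) = PySem.Set.add (pvTags L) s := by
      rw [pvTags, pvTags, List.map_append]
      exact PySem.Set.ofList_append_singleton _ _
    by_cases hs : s ∈ pvTags L
    · -- s already a key
      have hcont : E.contains s = true := (pv_contains_of_inv E L ih s).mpr hs
      set d := E.getD s PySem.Dict.empty with hd
      have hdit : d.items = (pvWords L s).map (fun y => (y, (L.count (s, y) : Int))) := by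
        have := pv_getD_of_inv E L ih s hs
        simpa [pvG] using this
      have hdkeys : d.keys = pvWords L s := pv_inner_keys d _ _ hdit
      have hdnd : d.keys.Nodup := by rw [hdkeys]; exact PySem.Set.nodup_ofList _
      have hwords' : pvWords (L ++ [(s, x)]) s = PySem.Set.add (pvWords L s) x := by
        rw [pvWords, pvWords, List.filter_append]
        have : [(s, x)].filter (fun p => p.1 == s) = [(s, x)] := by simp
        rw [this, List.map_append]
        exact PySem.Set.ofList_append_singleton _ _
      by_cases hx : (s, x) ∈ L
      · -- seen pair: bump in place
        have hxw : x ∈ pvWords L s := (pv_mem_words L s x).mpr hx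
        have hdx : d.contains x = true := by
          rw [PySem.Dict.contains_iff_mem_keys, hdkeys]; exact hxw
        have hdgd : d.getD x 0 = (L.count (s, x) : Int) :=
          PySem.Dict.getD_of_mem_items d (by rw [hdit]; exact List.mem_map_of_mem hxw) hdnd 0
        have hA : pvStepA E x s = E.insert s (d.insert x ((L.count (s, x) : Int) + 1)) := by
          simp only [pvStepA, hcont, if_true, ← hd, hdx, if_true, hdgd]
        set N : List (String × Int) :=
          d.items.map (fun w => if w.1 == x then (x, (L.count (s, x) : Int) + 1) else w) with hN
        have hNit : (d.insert x ((L.count (s, x) : Int) + 1)).items = N :=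
          PySem.Dict.items_insert_of_contains d _ hdx
        have hL : (pvFoldA (L ++ [(s, x)])).items.map pvF
            = (pvGroup L).map (fun r => if r.1 == s then (s, N) else r) := by
          rw [hstep, hA, PySem.Dict.items_insert_of_contains E _ hcont, List.map_map, ← ih,
              List.map_map]
          apply List.map_congr_left
          intro q _
          by_cases hq : q.1 = s
          · simp [pvF, hq, hNit]
          · simp [pvF, hq]
        rw [hL, pvGroup, List.map_map, pvGroup, htags', PySem.Set.add_of_mem hs]
        apply List.map_congr_left
        intro t _
        by_cases ht : t = s
        · rw [ht]
          simp only [Function.comp_apply, pvG, BEq.refl, if_true]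
          congr 1
          rw [hwords', PySem.Set.add_of_mem hxw, hN, hdit, List.map_map]
          apply List.map_congr_left
          intro y _
          by_cases hyx : y = x
          · subst hyx
            simp only [Function.comp_apply, BEq.refl, if_true]
            rw [pv_count_append, if_pos rfl]
            push_cast; ring_nf
          · have : (s, y) ≠ (s, x) := by intro h; exact hyx (congrArg Prod.snd h)
            simp only [Function.comp_apply]
            rw [if_neg (by simpa using hyx), pv_count_append, if_neg this]
            simp
        · simp only [Function.comp_apply]
          rw [if_neg (by simpa using ht)]
          exact (pvG_append_ne L s x t ht).symm
      · -- new word under an existing tag: append to the inner dict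
        have hxw : x ∉ pvWords L s := fun h => hx ((pv_mem_words L s x).mp h)
        have hdx : d.contains x = false := by
          rw [← Bool.not_eq_true, PySem.Dict.contains_iff_mem_keys, hdkeys]; exact hxw
        have hcnt0 : L.count (s, x) = 0 := pv_count_zero L s x hx
        have hA : pvStepA E x s = E.insert s (d.insert x 1) := by
          have hgd0 : (d.insert x 0).getD x 0 = (0 : Int) := by
            rw [PySem.Dict.getD_insert]; simp
          simp only [pvStepA, hcont, if_true, ← hd, hdx, Bool.false_eq_true, if_false, hgd0,
            PySem.Dict.insert_insert_self]
          norm_num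
        have hNit : (d.insert x (1 : Int)).items = d.items ++ [(x, 1)] :=
          PySem.Dict.items_insert_of_not_contains d _ hdx
        have hL : (pvFoldA (L ++ [(s, x)])).items.map pvF
            = (pvGroup L).map (fun r => if r.1 == s then (s, d.items ++ [(x, 1)]) else r) := by
          rw [hstep, hA, PySem.Dict.items_insert_of_contains E _ hcont, List.map_map, ← ih,
              List.map_map]
          apply List.map_congr_left
          intro q _
          by_cases hq : q.1 = s
          · simp [pvF, hq, hNit]
          · simp [pvF, hq]
        rw [hL, pvGroup, List.map_map, pvGroup, htags', PySem.Set.add_of_mem hs]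
        apply List.map_congr_left
        intro t _
        by_cases ht : t = s
        · rw [ht]
          simp only [Function.comp_apply, pvG, BEq.refl, if_true]
          congr 1
          rw [hwords', PySem.Set.add_of_not_mem hxw, List.map_append, hdit]
          congr 1
          · apply List.map_congr_left
            intro y hy
            have hyx : y ≠ x := fun h => hxw (h ▸ hy)
            have : (s, y) ≠ (s, x) := by intro h; exact hyx (congrArg Prod.snd h)
            rw [pv_count_append, if_neg this]
            simp
          · rw [List.map_singleton, pv_count_append, if_pos rfl, hcnt0]
            norm_num
        · simp only [Function.comp_apply]
          rw [if_neg (by simpa using ht)]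
          exact (pvG_append_ne L s x t ht).symm
    · -- brand new tag: append a fresh singleton inner dict
      have hx : (s, x) ∉ L := fun h => hs ((pv_mem_tags L s).mpr ⟨(s, x), h, rfl⟩)
      have hcont : E.contains s = false := by
        rw [← Bool.not_eq_true, pv_contains_of_inv E L ih s]; exact hs
      have hA : pvStepA E x s = E.insert s (PySem.Dict.empty.insert x 1) := by
        have h1 : (E.insert s PySem.Dict.empty).getD s PySem.Dict.empty = PySem.Dict.empty := by
          rw [PySem.Dict.getD_insert]; simp
        have h2 : (PySem.Dict.empty : PySem.Dict String Int).contains x = false :=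
          PySem.Dict.contains_empty x
        have h3 : ((PySem.Dict.empty : PySem.Dict String Int).insert x 0).getD x 0 = (0 : Int) := by
          rw [PySem.Dict.getD_insert]; simp
        simp only [pvStepA, hcont, Bool.false_eq_true, if_false, h1, h2, h3,
          PySem.Dict.insert_insert_self]
        norm_num
      have hL : (pvFoldA (L ++ [(s, x)])).items.map pvF
          = pvGroup L ++ [(s, [(x, 1)])] := by
        rw [hstep, hA, PySem.Dict.items_insert_of_not_contains E _ hcont, List.map_append, ih]
        have he : ((PySem.Dict.empty : PySem.Dict String Int).insert x 1).items = [(x, 1)] := by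
          rw [PySem.Dict.items_insert_of_not_contains _ _ (PySem.Dict.contains_empty x)]; rfl
        simp [pvF, he]
      rw [hL, show pvGroup (L ++ [(s, x)]) = (pvTags (L ++ [(s, x)])).map (pvG (L ++ [(s, x)])) from rfl,
          htags', PySem.Set.add_of_not_mem hs, List.map_append]
      congr 1
      · rw [pvGroup]
        apply List.map_congr_left
        intro t htm
        have ht : t ≠ s := fun h => hs (h ▸ htm)
        exact (pvG_append_ne L s x t ht).symm
      · rw [List.map_singleton]
        have hws : pvWords (L ++ [(s, x)]) s = [x] := by
          rw [pvWords, List.filter_append, pv_filter_nil L s hs]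
          simp [PySem.Set.ofList]
        rw [pvG, hws, List.map_singleton, pv_count_append, if_pos rfl, pv_count_zero L s x hx]
        norm_num

-- ---- B's result is the grouped shape ----

theorem pv_B_eq_group (sentences : List (List (List String))) (hpre : Pre_sx_counts sentences) :
    sx_counts_alt sentences = pvGroup (pvPairs sentences) := by
  rw [sx_counts_alt]
  simp only [pv_B_pairs sentences hpre]
  rw [pvGroup, pvTags]
  rw [PySem.List.dedup_eq_ofList]
  apply List.map_congr_left
  intro s _
  rw [pvG, pvWords, PySem.List.dedup_eq_ofList]
  simp only [PySem.List.count_eq]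

-- ===== VERDICT (by name: the statement is the Claim_ definition above) =====
theorem sx_counts_spec : Claim_equal_sx_counts := by
  intro input_sentences _hdom hpre
  unfold Spec_sx_counts sx_counts
  simp only []
  rw [pv_A_shape input_sentences hpre, pv_B_eq_group input_sentences hpre]
  exact pv_invariant (pvPairs input_sentences)
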